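-- pv_equiv track=rewrite | github.com/john-d-murphy/quine | core/regions.py | _split_region
-- ===== SOURCE A (Python) =====
-- from typing import Optional
--
-- _COMMENT_PREFIXES = ("//", "#", "--", ";", "/*", "*")
--
-- def _strip_comment(line: str) -> Optional[str]:
--     """
--     If *line* is a pure comment (possibly indented), return the text
--     after the comment marker. Otherwise return None.
--     """
--     stripped = line.lstrip()
--     for prefix in _COMMENT_PREFIXES:
--         if stripped.startswith(prefix):
--             after = stripped[len(prefix):]
--             # Normalise one leading space
--             if after.startswith(" "):
--                 after = after[1:]
--             return after
--     return None
--
-- def _split_region(raw_lines: list[str]) -> tuple[list[str], list[str]]: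
--     """
--     Split region lines into (prose_lines, code_lines).
--
--     Leading contiguous comment lines → prose (stripped of markers).
--     Everything after the first non-comment, non-blank line → code.
--     Blank lines within the leading comment block are included in prose.
--     """
--     prose: list[str] = []
--     code:  list[str] = []
--     in_prose = True
--
--     for line in raw_lines:
--         stripped = line.strip()
--         if not stripped:
--             # blank line: stays in prose while in_prose, else in code
--             if in_prose:
--                 prose.append("")
--             else:
--                 code.append(line.rstrip())
--             continue
--
--         if in_prose:
--             comment_text = _strip_comment(line)
--             if comment_text is not None:
--                 prose.append(comment_text)
--             else:
--                 in_prose = False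
--                 code.append(line.rstrip())
--         else:
--             code.append(line.rstrip())
--
--     # Trim trailing blanks from prose
--     while prose and not prose[-1]:
--         prose.pop()
--
--     return prose, code
-- ===== SOURCE B (Python) =====
-- from typing import Optional
--
-- _COMMENT_PREFIXES = ("//", "#", "--", ";", "/*", "*")
--
-- def _strip_comment(line: str) -> Optional[str]:
--     stripped = line.lstrip()
--     for prefix in _COMMENT_PREFIXES:
--         if stripped.startswith(prefix):
--             after = stripped[len(prefix):]
--             if after.startswith(" "):
--                 after = after[1:]
--             return after
--     return None
--
-- def _split_region(raw_lines: list[str]) -> tuple[list[str], list[str]]: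
--     # Boundary-finding instead of a state flag: the code part starts at the
--     # first non-blank line that is not a pure comment.
--     split = len(raw_lines)
--     for i, line in enumerate(raw_lines):
--         if line.strip() and _strip_comment(line) is None:
--             split = i
--             break
--     prose = ["" if not l.strip() else (_strip_comment(l) or "")
--              for l in raw_lines[:split]]
--     k = len(prose)
--     while k and not prose[k - 1]:
--         k -= 1
--     code = [l.rstrip() for l in raw_lines[split:]]
--     return prose[:k], code
-- ===== Notes on version B (the rewrite author's own statement) =====
-- stated objective: simpler
-- what changed: Replaces A's stateful in_prose flag loop with boundary-finding: locate the first non-blank non-comment line, then build prose and code by mapping over the two slices, trimming trailing blanks by index instead of pop.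
import Mathlib
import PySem

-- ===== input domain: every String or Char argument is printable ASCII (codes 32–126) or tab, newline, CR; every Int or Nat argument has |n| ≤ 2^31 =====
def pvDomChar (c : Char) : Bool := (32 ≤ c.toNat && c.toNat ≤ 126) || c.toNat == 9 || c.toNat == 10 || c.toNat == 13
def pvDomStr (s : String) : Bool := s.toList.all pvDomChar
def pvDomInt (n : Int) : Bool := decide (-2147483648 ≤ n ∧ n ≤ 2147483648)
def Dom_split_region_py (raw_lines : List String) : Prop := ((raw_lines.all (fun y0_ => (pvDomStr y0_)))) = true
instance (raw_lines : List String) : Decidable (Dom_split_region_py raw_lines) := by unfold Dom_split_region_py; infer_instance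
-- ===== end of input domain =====

-- B replaces A's stateful in_prose flag by boundary-finding plus two slice maps (objective: simpler).

-- ===== PORT A =====
def pvCommentPrefixes : List String := ["//", "#", "--", ";", "/*", "*"]

-- shared helper _strip_comment (identical in Source A and Source B); the for-with-return is recursion over the prefix list
def stripCommentGo (stripped : String) : List String → Option String
  | [] => none
  | p :: ps =>
    if PySem.Str.startswith stripped p then
      let after := PySem.Str.slice stripped (some (PySem.Str.len p : Int)) none
      let after := if PySem.Str.startswith after " " then PySem.Str.slice after (some 1) none else after
      some after
    else stripCommentGo stripped ps

def stripCommentPy (line : String) : Option String :=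
  stripCommentGo (PySem.Str.lstrip line) pvCommentPrefixes

-- the loop body of A: state (prose, code, in_prose)
def splitRegionStep (st : List String × List String × Bool) (line : String) :
    List String × List String × Bool :=
  let (prose, code, in_prose) := st
  let stripped := PySem.Str.strip line
  if stripped = "" then
    if in_prose then (prose ++ [""], code, in_prose)
    else (prose, code ++ [PySem.Str.rstrip line], in_prose)
  else if in_prose then
    match stripCommentPy line with
    | some comment_text => (prose ++ [comment_text], code, true)
    | none => (prose, code ++ [PySem.Str.rstrip line], false)
  else (prose, code ++ [PySem.Str.rstrip line], false)

-- "while prose and not prose[-1]: prose.pop()"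
def popTrailingBlanks (l : List String) : List String :=
  if l.getLast? = some "" then popTrailingBlanks l.dropLast else l
termination_by l.length
decreasing_by
  cases l with
  | nil => simp at *
  | cons a as => simp [List.length_dropLast]

def split_region_py (raw_lines : List String) : List String × List String :=
  let st := raw_lines.foldl splitRegionStep ([], [], true)
  (popTrailingBlanks st.1, st.2.1)

-- ===== PORT B =====
-- "for i, line in enumerate(raw_lines): if line.strip() and _strip_comment(line) is None: split = i; break" (default len)
def findBoundary : List String → Nat
  | [] => 0
  | line :: rest =>
    if PySem.Str.strip line ≠ "" ∧ stripCommentPy line = none then 0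
    else findBoundary rest + 1

-- "k = len(prose); while k and not prose[k-1]: k -= 1"
def trimLenGo (prose : List String) : Nat → Nat
  | 0 => 0
  | k + 1 => if prose.getD k "" = "" then trimLenGo prose k else k + 1

def split_region_py_alt (raw_lines : List String) : List String × List String :=
  let split := findBoundary raw_lines
  let prose := (PySem.List.slice raw_lines none (some (split : Int))).map
      (fun l => if PySem.Str.strip l = "" then "" else (stripCommentPy l).getD "")
  let k := trimLenGo prose prose.length
  let code := (PySem.List.slice raw_lines (some (split : Int)) none).map PySem.Str.rstrip
  (PySem.List.slice prose none (some (k : Int)), code)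

-- ===== PRECONDITION & SPEC =====
def Spec_split_region_py (raw_lines : List String) (out : List String × List String) : Prop := out = split_region_py_alt raw_lines
instance (raw_lines : List String) (out : List String × List String) : Decidable (Spec_split_region_py raw_lines out) := by unfold Spec_split_region_py; infer_instance

-- ===== CLAIM (what is proved, stated in full; the proofs are below) =====
def Claim_equal_split_region_py : Prop := ∀ (raw_lines : List String), Dom_split_region_py raw_lines → Spec_split_region_py raw_lines (split_region_py raw_lines)

-- ===== LEMMAS AND PROOFS =====

def proseMap (l : String) : String :=
  if PySem.Str.strip l = "" then "" else (stripCommentPy l).getD ""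

-- step evaluation lemmas
theorem step_false (p c : List String) (line : String) :
    splitRegionStep (p, c, false) line = (p, c ++ [PySem.Str.rstrip line], false) := by
  by_cases h : PySem.Str.strip line = "" <;> simp [splitRegionStep, h]

theorem step_true_blank (p c : List String) (line : String) (h : PySem.Str.strip line = "") :
    splitRegionStep (p, c, true) line = (p ++ [""], c, true) := by
  simp [splitRegionStep, h]

theorem step_true_comment (p c : List String) (line : String) (h : PySem.Str.strip line ≠ "")
    (t : String) (hsc : stripCommentPy line = some t) :
    splitRegionStep (p, c, true) line = (p ++ [t], c, true) := by
  simp [splitRegionStep, h, hsc]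

theorem step_true_code (p c : List String) (line : String) (h : PySem.Str.strip line ≠ "")
    (hsc : stripCommentPy line = none) :
    splitRegionStep (p, c, true) line = (p, c ++ [PySem.Str.rstrip line], false) := by
  simp [splitRegionStep, h, hsc]

-- once in_prose is false, every remaining line goes to code
theorem foldl_step_false (raw : List String) (p c : List String) :
    raw.foldl splitRegionStep (p, c, false) = (p, c ++ raw.map PySem.Str.rstrip, false) := by
  induction raw generalizing c with
  | nil => simp
  | cons line rest ih =>
      rw [List.foldl_cons, step_false, ih]
      simp

-- the main loop characterised by the boundary index
theorem foldl_step_true (raw : List String) (p : List String) :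
    raw.foldl splitRegionStep (p, [], true) =
      (p ++ (raw.take (findBoundary raw)).map proseMap,
       (raw.drop (findBoundary raw)).map PySem.Str.rstrip,
       decide (findBoundary raw = raw.length)) := by
  induction raw generalizing p with
  | nil => simp [findBoundary]
  | cons line rest ih =>
      by_cases hb : PySem.Str.strip line = ""
      · have hfb : findBoundary (line :: rest) = findBoundary rest + 1 := by
          simp [findBoundary, hb]
        rw [List.foldl_cons, step_true_blank _ _ _ hb, ih, hfb]
        simp [proseMap, hb, List.take_succ_cons, List.drop_succ_cons]
      · cases hsc : stripCommentPy line with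
        | none =>
            have hfb : findBoundary (line :: rest) = 0 := by
              simp [findBoundary, hb, hsc]
            rw [List.foldl_cons, step_true_code _ _ _ hb hsc, foldl_step_false, hfb]
            simp
        | some t =>
            have hfb : findBoundary (line :: rest) = findBoundary rest + 1 := by
              simp [findBoundary, hb, hsc]
            rw [List.foldl_cons, step_true_comment _ _ _ hb t hsc, ih, hfb]
            simp [proseMap, hb, hsc, List.take_succ_cons, List.drop_succ_cons]

theorem trimLenGo_le (l : List String) (k : Nat) : trimLenGo l k ≤ k := by
  induction k with
  | zero => simp [trimLenGo]
  | succ k ih => simp only [trimLenGo]; split_ifs <;> omega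

theorem trimLenGo_concat (xs : List String) (x : String) (k : Nat) (hk : k ≤ xs.length) :
    trimLenGo (xs ++ [x]) k = trimLenGo xs k := by
  induction k with
  | zero => rfl
  | succ k ih =>
      have h : (xs ++ [x]).getD k "" = xs.getD k "" := by
        simp [List.getD, List.getElem?_append_left (by omega : k < xs.length)]
      simp only [trimLenGo, h]
      split_ifs
      · exact ih (by omega)
      · rfl

theorem pop_eq_rdrop (l : List String) :
    popTrailingBlanks l = l.rdropWhile (fun s => s == "") := by
  induction l using List.reverseRecOn with
  | nil => simp [popTrailingBlanks, List.rdropWhile]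
  | append_singleton xs x ih =>
      rw [popTrailingBlanks]
      by_cases hx : x = ""
      · subst hx
        rw [List.rdropWhile_concat_pos _ _ _ (by decide)]
        simpa using ih
      · have : ¬ ((xs ++ [x]).getLast? = some "") := by simp [hx]
        rw [if_neg this, List.rdropWhile_concat_neg _ _ _ (by simp [hx])]

theorem take_trim_eq_rdrop (l : List String) :
    l.take (trimLenGo l l.length) = l.rdropWhile (fun s => s == "") := by
  induction l using List.reverseRecOn with
  | nil => simp [trimLenGo]
  | append_singleton xs x ih =>
      have hlen : (xs ++ [x]).length = xs.length + 1 := by simp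
      rw [hlen]
      have hget : (xs ++ [x]).getD xs.length "" = x := by
        simp [List.getD]
      simp only [trimLenGo, hget]
      by_cases hx : x = ""
      · rw [if_pos hx, trimLenGo_concat xs x xs.length le_rfl,
          List.take_append_of_le_length (trimLenGo_le xs xs.length), ih,
          List.rdropWhile_concat_pos _ _ _ (by simp [hx])]
      · rw [if_neg hx, List.take_of_length_le (by simp),
          List.rdropWhile_concat_neg _ _ _ (by simp [hx])]

-- ===== VERDICT (by name: the statement is the Claim_ definition above) =====
theorem split_region_py_spec : Claim_equal_split_region_py := by
  intro raw_lines _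
  unfold Spec_split_region_py split_region_py split_region_py_alt
  rw [foldl_step_true raw_lines []]
  simp only [List.nil_append]
  rw [PySem.List.slice_to_natCast, PySem.List.slice_from_natCast, PySem.List.slice_to_natCast]
  show (popTrailingBlanks ((raw_lines.take (findBoundary raw_lines)).map proseMap), _) =
    (((raw_lines.take (findBoundary raw_lines)).map proseMap).take
      (trimLenGo ((raw_lines.take (findBoundary raw_lines)).map proseMap)
        ((raw_lines.take (findBoundary raw_lines)).map proseMap).length), _)
  rw [pop_eq_rdrop, take_trim_eq_rdrop]
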